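-- pv_equiv track=rewrite | github.com/tmoore44a-ship-it/ai-job-assistant | main.py | format_tailored_bullets
-- ===== SOURCE A (Python) =====
-- def sanitize_model_text(text):
--     """
--     Normalize possibly-empty text values from forms, DB rows, or AI output.
--     """
--     return (text or "").strip()
--
-- def format_tailored_bullets(text):
--     """
--     Normalize the tailored-bullets block for cleaner display.
--     """
--     cleaned = sanitize_model_text(text)
--     if not cleaned:
--         return ""
--
--     lines = [line.rstrip() for line in cleaned.splitlines()]
--     formatted_lines = []
--     previous_blank = False
--
--     for line in lines:
--         stripped = line.strip()
--
--         if not stripped: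
--             if not previous_blank:
--                 formatted_lines.append("")
--             previous_blank = True
--             continue
--
--         previous_blank = False
--
--         if stripped.upper().startswith("MATCH SUMMARY"):
--             formatted_lines.append("MATCH SUMMARY")
--         elif stripped.upper().startswith("TAILORED BULLETS"):
--             formatted_lines.append("TAILORED BULLETS")
--         elif stripped.upper().startswith("KEYWORDS TO MIRROR"):
--             formatted_lines.append("KEYWORDS TO MIRROR")
--         else:
--             formatted_lines.append(stripped)
--
--     return "\n".join(formatted_lines).strip()
-- ===== SOURCE B (Python) =====
-- def _canon_line(s):
--     """Canonicalize an already-stripped nonblank line's header prefix."""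
--     u = s.upper()
--     if u.startswith("MATCH SUMMARY"):
--         return "MATCH SUMMARY"
--     if u.startswith("TAILORED BULLETS"):
--         return "TAILORED BULLETS"
--     if u.startswith("KEYWORDS TO MIRROR"):
--         return "KEYWORDS TO MIRROR"
--     return s
--
--
-- def format_tailored_bullets(text):
--     """
--     Normalize the tailored-bullets block for cleaner display.
--
--     Group the non-blank lines into paragraphs (runs separated by blank
--     lines) and join the paragraphs with one blank line; no blank-line
--     bookkeeping flag and no final strip are needed.
--     """
--     paragraphs = []
--     current = []
--     for line in ((text or "").strip()).splitlines():
--         s = line.strip()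
--         if s:
--             current.append(_canon_line(s))
--         elif current:
--             paragraphs.append(current)
--             current = []
--     if current:
--         paragraphs.append(current)
--     return "\n\n".join("\n".join(p) for p in paragraphs)
-- ===== Notes on version B (the rewrite author's own statement) =====
-- stated objective: alternative
-- what changed: A's single flag-carrying loop that emits blank-line markers and relies on a final newline-join plus strip is replaced by grouping the non-blank lines into paragraphs (a list of lists) and joining the paragraphs with one blank line between them -- no previous_blank flag, no emitted blank lines, no early return and no final strip.
import Mathlib
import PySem

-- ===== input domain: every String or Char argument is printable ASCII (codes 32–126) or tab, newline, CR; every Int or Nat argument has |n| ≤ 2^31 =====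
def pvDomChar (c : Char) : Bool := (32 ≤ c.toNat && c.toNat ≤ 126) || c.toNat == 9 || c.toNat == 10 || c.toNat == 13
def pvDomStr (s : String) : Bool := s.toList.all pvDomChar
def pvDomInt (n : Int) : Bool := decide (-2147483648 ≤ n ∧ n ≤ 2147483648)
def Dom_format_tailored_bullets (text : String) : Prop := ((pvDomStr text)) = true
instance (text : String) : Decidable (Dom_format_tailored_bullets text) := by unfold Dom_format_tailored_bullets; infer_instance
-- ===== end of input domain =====

-- B replaces A's flag-carrying loop (emit blank markers, final join+strip) by grouping
-- the non-blank lines into paragraphs joined with "\n\n"; objective: alternative, same cost.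


-- ===== PORT A =====
-- the body of A's for-loop over lines, state = (formatted_lines, previous_blank)
def pvStepA (st : List String × Bool) (line : String) : List String × Bool :=
  let stripped := PySem.Str.strip line
  if stripped == "" then
    if st.2 then (st.1, true) else (st.1 ++ [""], true)
  else
    let out :=
      if PySem.Str.startswith (PySem.Str.upper stripped) "MATCH SUMMARY" then "MATCH SUMMARY"
      else if PySem.Str.startswith (PySem.Str.upper stripped) "TAILORED BULLETS" then "TAILORED BULLETS"
      else if PySem.Str.startswith (PySem.Str.upper stripped) "KEYWORDS TO MIRROR" then "KEYWORDS TO MIRROR"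
      else stripped
    (st.1 ++ [out], false)

def format_tailored_bullets (text : String) : String :=
  let cleaned := PySem.Str.strip text
  if cleaned == "" then ""
  else
    let lines := (PySem.Str.splitlines cleaned).map PySem.Str.rstrip
    let res := lines.foldl pvStepA ([], false)
    PySem.Str.strip (PySem.Str.join "\n" res.1)

-- ===== PORT B =====
-- Source B's _canon_line: canonicalize an already-stripped non-blank line's header prefix
def pvCanonLine (s : String) : String :=
  let u := PySem.Str.upper s
  if PySem.Str.startswith u "MATCH SUMMARY" then "MATCH SUMMARY"
  else if PySem.Str.startswith u "TAILORED BULLETS" then "TAILORED BULLETS"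
  else if PySem.Str.startswith u "KEYWORDS TO MIRROR" then "KEYWORDS TO MIRROR"
  else s

-- the body of Source B's for-loop, state = (paragraphs, current)
def pvStepB (st : List (List String) × List String) (line : String) :
    List (List String) × List String :=
  let s := PySem.Str.strip line
  if s != "" then (st.1, st.2 ++ [pvCanonLine s])
  else if st.2 != [] then (st.1 ++ [st.2], []) else st

def format_tailored_bullets_alt (text : String) : String :=
  let st := (PySem.Str.splitlines (PySem.Str.strip text)).foldl pvStepB ([], [])
  let paragraphs := if st.2 != [] then st.1 ++ [st.2] else st.1
  PySem.Str.join "\n\n" (paragraphs.map (fun p => PySem.Str.join "\n" p))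

-- ===== PRECONDITION & SPEC =====
def Spec_format_tailored_bullets (text : String) (out : String) : Prop := out = format_tailored_bullets_alt text
instance (text : String) (out : String) : Decidable (Spec_format_tailored_bullets text out) := by unfold Spec_format_tailored_bullets; infer_instance

-- ===== CLAIM (what is proved, stated in full; the proofs are below) =====
def Claim_equal_format_tailored_bullets : Prop := ∀ (text : String), Dom_format_tailored_bullets text → Spec_format_tailored_bullets text (format_tailored_bullets text)

-- ===== LEMMAS AND PROOFS =====

-- the canonical line both programs compute for a raw line
def pvC (l : String) : String := pvCanonLine (PySem.Str.strip l)

-- A's blank-run collapse, generic in the element type and the blank test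
def pvCollapse {α : Type} (bl : α → Bool) : List α → List α
  | [] => []
  | x :: r =>
    if bl x then x :: pvCollapse bl (r.dropWhile bl)
    else x :: pvCollapse bl r
termination_by l => l.length
decreasing_by
  · exact Nat.lt_succ_of_le (List.length_dropWhile_le _ _)
  · simp

-- B's paragraph grouping, generic
def pvG {α : Type} (bl : α → Bool) : List α → List (List α)
  | [] => []
  | x :: r =>
    if bl x then pvG bl r
    else (x :: r.takeWhile (fun y => !bl y)) :: pvG bl (r.dropWhile (fun y => !bl y))
termination_by l => l.length
decreasing_by
  · simp
  · exact Nat.lt_succ_of_le (List.length_dropWhile_le _ _)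

-- groups joined with a single blank element between them
def pvInter {α : Type} (e : α) : List (List α) → List α
  | [] => []
  | [g] => g
  | g :: g2 :: rest => g ++ e :: pvInter e (g2 :: rest)

-- drop trailing elements satisfying bl
def pvRT {α : Type} (bl : α → Bool) (xs : List α) : List α :=
  (xs.reverse.dropWhile bl).reverse

-- a char list that is empty or equal to its own strip
def CanonC (d : List Char) : Prop := d = [] ∨ (d ≠ [] ∧ PySem.Chars.strip d = d)

lemma pv_dropWhile_of_false {α : Type} (bl : α → Bool) (l : List α)
    (h : ∀ x ∈ l, bl x = false) : l.dropWhile bl = l := by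
  cases l with
  | nil => rfl
  | cons x t => simp [h x (by simp)]

lemma pv_dropWhile_head_false {α : Type} (bl : α → Bool) (l : List α) (x : α) (t : List α)
    (h : l.dropWhile bl = x :: t) : bl x = false := by
  induction l with
  | nil => simp at h
  | cons y r ih =>
    by_cases hy : bl y
    · exact ih (by simpa [List.dropWhile_cons, hy] using h)
    · rw [List.dropWhile_cons, if_neg (by simp [hy])] at h
      cases h; simpa using hy

lemma pv_mem_pvCollapse {α : Type} (bl : α → Bool) :
    ∀ (n : Nat) (ds : List α), ds.length ≤ n → ∀ x ∈ pvCollapse bl ds, x ∈ ds := by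
  intro n
  induction n with
  | zero =>
    intro ds hds x hx
    have : ds = [] := List.length_eq_zero_iff.mp (Nat.le_zero.mp hds)
    subst this; simp [pvCollapse] at hx
  | succ n ih =>
    intro ds hds x hx
    cases ds with
    | nil => simp [pvCollapse] at hx
    | cons y r =>
      by_cases hy : bl y
      · rw [pvCollapse, if_pos hy] at hx
        rcases List.mem_cons.mp hx with hx | hx
        · simp [hx]
        · have hlen : (r.dropWhile bl).length ≤ n :=
            le_trans (List.length_dropWhile_le _ _) (by simpa using hds)
          have := ih _ hlen x hx
          exact List.mem_cons_of_mem _ ((List.dropWhile_sublist bl).subset this)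
      · rw [pvCollapse, if_neg hy] at hx
        rcases List.mem_cons.mp hx with hx | hx
        · simp [hx]
        · exact List.mem_cons_of_mem _ (ih r (by simpa using hds) x hx)

lemma pv_pvCollapse_run {α : Type} (bl : α → Bool) (run tl : List α)
    (h : ∀ x ∈ run, bl x = false) :
    pvCollapse bl (run ++ tl) = run ++ pvCollapse bl tl := by
  induction run with
  | nil => simp
  | cons x t ih =>
    rw [List.cons_append, pvCollapse, if_neg (by simp [h x (by simp)]),
      ih (fun y hy => h y (by simp [hy]))]
    simp

lemma pv_pvG_dropWhile {α : Type} (bl : α → Bool) (ds : List α) :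
    pvG bl (ds.dropWhile bl) = pvG bl ds := by
  induction ds with
  | nil => rfl
  | cons x r ih =>
    by_cases hx : bl x
    · rw [List.dropWhile_cons, if_pos hx, ih, pvG, if_pos hx]
    · rw [List.dropWhile_cons, if_neg (by simp [hx])]

lemma pv_pvG_ne_nil {α : Type} (bl : α → Bool) :
    ∀ (n : Nat) (ds : List α), ds.length ≤ n → ∀ g ∈ pvG bl ds, g ≠ [] := by
  intro n
  induction n with
  | zero =>
    intro ds hds g hg
    have : ds = [] := List.length_eq_zero_iff.mp (Nat.le_zero.mp hds)
    subst this; simp [pvG] at hg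
  | succ n ih =>
    intro ds hds g hg
    cases ds with
    | nil => simp [pvG] at hg
    | cons x r =>
      by_cases hx : bl x
      · rw [pvG, if_pos hx] at hg
        exact ih r (by simpa using hds) g hg
      · rw [pvG, if_neg hx] at hg
        rcases List.mem_cons.mp hg with hg | hg
        · simp [hg]
        · exact ih _ (le_trans (List.length_dropWhile_le _ _) (by simpa using hds)) g hg

lemma pv_pvInter_ne_nil {α : Type} (e : α) (gs : List (List α)) (hne : gs ≠ [])
    (h : ∀ g ∈ gs, g ≠ []) : pvInter e gs ≠ [] := by
  cases gs with
  | nil => exact absurd rfl hne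
  | cons g rest =>
    cases rest with
    | nil => simpa [pvInter] using h g (by simp)
    | cons g2 r2 => simp [pvInter]

lemma pv_pvRT_eq_self {α : Type} (bl : α → Bool) (xs : List α)
    (h : ∀ x ∈ xs, bl x = false) : pvRT bl xs = xs := by
  unfold pvRT
  rw [pv_dropWhile_of_false bl _ (fun x hx => h x (by simpa using hx)), List.reverse_reverse]

lemma pv_pvRT_append {α : Type} (bl : α → Bool) (A B : List α)
    (h : pvRT bl B ≠ []) : pvRT bl (A ++ B) = A ++ pvRT bl B := by
  unfold pvRT at *
  have hB : (B.reverse.dropWhile bl) ≠ [] := fun hn => h (by simp [hn])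
  rw [List.reverse_append, List.dropWhile_append,
    if_neg (by simpa [List.isEmpty_iff] using hB)]
  simp

-- trailing-blank drop of a leading-blank-dropped collapse is the paragraphs with one
-- blank between them
lemma pv_K {α : Type} (bl : α → Bool) (e : α) (hbe : ∀ x, bl x = true → x = e) :
    ∀ (n : Nat) (ds : List α), ds.length ≤ n →
      pvRT bl ((pvCollapse bl ds).dropWhile bl) = pvInter e (pvG bl ds) := by
  intro n
  induction n with
  | zero =>
    intro ds hds
    have : ds = [] := List.length_eq_zero_iff.mp (Nat.le_zero.mp hds)
    subst this; simp [pvCollapse, pvG, pvInter, pvRT]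
  | succ n ih =>
    intro ds hds
    cases ds with
    | nil => simp [pvCollapse, pvG, pvInter, pvRT]
    | cons x r =>
      by_cases hx : bl x
      · -- leading blank: dropped on both sides
        rw [pvCollapse, if_pos hx, List.dropWhile_cons, if_pos hx]
        have hlen : (r.dropWhile bl).length ≤ n :=
          le_trans (List.length_dropWhile_le _ _) (by simpa using hds)
        rw [ih _ hlen, pv_pvG_dropWhile, pvG, if_pos hx]
      · -- head of a non-blank run
        have hxm : ∀ y ∈ (x :: r.takeWhile (fun y => !bl y)), bl y = false := by
          intro y hy
          rcases List.mem_cons.mp hy with hy | hy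
          · simpa [hy] using hx
          · simpa using List.mem_takeWhile_imp hy
        have hr : r = r.takeWhile (fun y => !bl y) ++ r.dropWhile (fun y => !bl y) :=
          (List.takeWhile_append_dropWhile).symm
        rw [pvG, if_neg hx]
        rw [show (x :: r) = (x :: r.takeWhile (fun y => !bl y)) ++ r.dropWhile (fun y => !bl y) by
          rw [List.cons_append]; exact congrArg (x :: ·) hr]
        rw [pv_pvCollapse_run bl _ _ hxm]
        rw [List.dropWhile_append]
        rw [if_neg (by
          rw [pv_dropWhile_of_false bl _ hxm]; simp)]
        rw [pv_dropWhile_of_false bl _ hxm]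
        cases hd : r.dropWhile (fun y => !bl y) with
        | nil =>
          rw [pvCollapse]
          simp only [List.append_nil]
          rw [pv_pvRT_eq_self bl _ hxm, pvG, pvInter]
        | cons y r2 =>
          have hy : bl y = true := by
            simpa using pv_dropWhile_head_false (fun y => !bl y) r y r2 hd
          have hye : y = e := hbe y hy
          rw [pvCollapse, if_pos hy]
          have hlen3 : (r2.dropWhile bl).length ≤ n := by
            have h1 : (r2.dropWhile bl).length ≤ r2.length := List.length_dropWhile_le _ _
            have h2 : (y :: r2).length ≤ r.length := by
              rw [← hd]; exact List.length_dropWhile_le _ _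
            have h3 := hds
            simp at h2 h3
            omega
          cases hr3c : r2.dropWhile bl with
          | nil =>
            -- a run of trailing blanks only
            simp only [pvCollapse]
            have hrt : pvRT bl ((x :: r.takeWhile (fun y => !bl y)) ++ [y]) =
                x :: r.takeWhile (fun y => !bl y) := by
              unfold pvRT
              rw [List.reverse_append]
              simp only [List.reverse_cons, List.reverse_nil, List.nil_append,
                List.singleton_append, List.dropWhile_cons]
              rw [if_pos (by simpa using hy),
                pv_dropWhile_of_false bl _ (by
                  intro z hz
                  exact hxm z (by simp at hz ⊢; tauto))]
              simp
            rw [show ((x :: List.takeWhile (fun y => !bl y) r) ++ y :: ([] : List α))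
                = (x :: List.takeWhile (fun y => !bl y) r) ++ [y] from rfl, hrt]
            rw [pvG, if_pos hy, ← pv_pvG_dropWhile bl r2, hr3c, pvG, pvInter]
          | cons z r4 =>
            have hz : bl z = false := pv_dropWhile_head_false bl r2 z r4 hr3c
            have hlen4 : (z :: r4).length ≤ n := by rw [← hr3c]; exact hlen3
            have hcol3 : List.dropWhile bl (pvCollapse bl (z :: r4)) = pvCollapse bl (z :: r4) := by
              rw [pvCollapse, if_neg (by simp [hz]), List.dropWhile_cons,
                if_neg (by simp [hz])]
            have IH3 : pvRT bl (pvCollapse bl (z :: r4)) = pvInter e (pvG bl (z :: r4)) := by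
              rw [← hcol3]; exact ih (z :: r4) hlen4
            have hg3 : pvG bl (z :: r4) ≠ [] := by
              rw [pvG, if_neg (by simp [hz])]; simp
            have hg3ne : ∀ g ∈ pvG bl (z :: r4), g ≠ [] :=
              pv_pvG_ne_nil bl (z :: r4).length (z :: r4) le_rfl
            have hrt3 : pvRT bl (pvCollapse bl (z :: r4)) ≠ [] := by
              rw [IH3]; exact pv_pvInter_ne_nil e _ hg3 hg3ne
            have hrty : pvRT bl (y :: pvCollapse bl (z :: r4))
                = y :: pvRT bl (pvCollapse bl (z :: r4)) := by
              simpa using pv_pvRT_append bl [y] (pvCollapse bl (z :: r4)) hrt3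
            have hGy : pvG bl (y :: r2) = pvG bl (z :: r4) := by
              rw [pvG, if_pos hy, ← pv_pvG_dropWhile bl r2, hr3c]
            rw [pv_pvRT_append bl _ _ (by rw [hrty]; simp), hrty, IH3, hGy]
            cases hg : pvG bl (z :: r4) with
            | nil => exact absurd hg hg3
            | cons g2 gs2 =>
              rw [pvInter, hye]

-- join over a (nonempty ++ nonempty) split
lemma pv_join_append (sep : List Char) (A B : List (List Char)) (hA : A ≠ []) (hB : B ≠ []) :
    PySem.Chars.join sep (A ++ B) = PySem.Chars.join sep A ++ sep ++ PySem.Chars.join sep B := by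
  cases B with
  | nil => exact absurd rfl hB
  | cons b B' =>
    induction A with
    | nil => exact absurd rfl hA
    | cons a A' ih =>
      cases A' with
      | nil => simp [PySem.Chars.join_singleton, PySem.Chars.join_cons_cons]
      | cons a2 A'' =>
        have ih2 := ih (by simp)
        rw [List.cons_append] at ih2
        rw [List.cons_append, List.cons_append, PySem.Chars.join_cons_cons, ih2,
          PySem.Chars.join_cons_cons (p := a) (q := a2)]
        simp

lemma pv_lstrip_join (ds : List (List Char))
    (h : ∀ d ∈ ds, d = [] ∨ ∃ c t, d = c :: t ∧ PySem.Chars.isspace c = false) :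
    PySem.Chars.lstrip (PySem.Chars.join ['\n'] ds)
      = PySem.Chars.join ['\n'] (ds.dropWhile (·.isEmpty)) := by
  induction ds with
  | nil => rfl
  | cons d rest ih =>
    rcases h d (by simp) with hd | ⟨c, t, hd, hc⟩
    · subst hd
      cases rest with
      | nil => rfl
      | cons r1 r' =>
        rw [PySem.Chars.join_cons_cons]
        have : ([] : List Char) ++ ['\n'] ++ PySem.Chars.join ['\n'] (r1 :: r')
            = '\n' :: PySem.Chars.join ['\n'] (r1 :: r') := by simp
        rw [this]
        have hsp : PySem.Chars.isspace '\n' = true := by decide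
        rw [show PySem.Chars.lstrip ('\n' :: PySem.Chars.join ['\n'] (r1 :: r'))
            = PySem.Chars.lstrip (PySem.Chars.join ['\n'] (r1 :: r')) by
          simp [PySem.Chars.lstrip, hsp]]
        rw [ih (fun x hx => h x (by simp [hx]))]
        simp
    · subst hd
      have hkeep : List.dropWhile (·.isEmpty) ((c :: t) :: rest) = (c :: t) :: rest := by
        simp
      rw [hkeep]
      cases rest with
      | nil =>
        rw [PySem.Chars.join_singleton]
        simp [PySem.Chars.lstrip, hc]
      | cons r1 r' =>
        rw [PySem.Chars.join_cons_cons]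
        simp [PySem.Chars.lstrip, hc]

lemma pv_reverse_join (ds : List (List Char)) :
    (PySem.Chars.join ['\n'] ds).reverse
      = PySem.Chars.join ['\n'] (ds.reverse.map List.reverse) := by
  induction ds with
  | nil => rfl
  | cons d rest ih =>
    cases rest with
    | nil => simp [PySem.Chars.join_singleton]
    | cons r1 r' =>
      rw [PySem.Chars.join_cons_cons]
      have hmap : ((d :: r1 :: r').reverse.map List.reverse)
          = ((r1 :: r').reverse.map List.reverse) ++ [d.reverse] := by simp
      rw [hmap, pv_join_append ['\n'] _ _ (by simp) (by simp), ← ih,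
        PySem.Chars.join_singleton]
      simp

lemma pv_rstrip_eq_lstrip_reverse (l : List Char) :
    PySem.Chars.rstrip l = (PySem.Chars.lstrip l.reverse).reverse := rfl

lemma pv_rstrip_join (ds : List (List Char))
    (h : ∀ d ∈ ds, d = [] ∨ ∃ c t, d.reverse = c :: t ∧ PySem.Chars.isspace c = false) :
    PySem.Chars.rstrip (PySem.Chars.join ['\n'] ds)
      = PySem.Chars.join ['\n'] (pvRT (·.isEmpty) ds) := by
  rw [pv_rstrip_eq_lstrip_reverse, pv_reverse_join]
  rw [pv_lstrip_join (ds.reverse.map List.reverse) (by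
    intro d hd
    simp only [List.mem_map, List.mem_reverse] at hd
    rcases hd with ⟨d0, hd0, rfl⟩
    rcases h d0 hd0 with h0 | ⟨c, t, h0, hc⟩
    · left; simp [h0]
    · right; exact ⟨c, t, h0, hc⟩)]
  rw [List.dropWhile_map]
  have : ((fun d : List Char => d.isEmpty) ∘ List.reverse) = (fun d : List Char => d.isEmpty) := by
    funext d; simp [Function.comp]
  rw [this, pv_reverse_join]
  unfold pvRT
  simp [List.map_map]

lemma pv_join_pvInter (gs : List (List (List Char))) (h : ∀ g ∈ gs, g ≠ []) :
    PySem.Chars.join ['\n'] (pvInter ([] : List Char) gs)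
      = PySem.Chars.join ['\n', '\n'] (gs.map (PySem.Chars.join ['\n'])) := by
  induction gs with
  | nil => rfl
  | cons g rest ih =>
    cases rest with
    | nil => simp [pvInter, PySem.Chars.join_singleton]
    | cons g2 r2 =>
      rw [pvInter]
      have hg : g ≠ [] := h g (by simp)
      have hg2 : g2 ≠ [] := h g2 (by simp)
      have hP : pvInter ([] : List Char) (g2 :: r2) ≠ [] := by
        apply pv_pvInter_ne_nil
        · simp
        · intro g' hg'; exact h g' (by simp [hg'])
      rw [pv_join_append ['\n'] g _ hg (by simp)]
      cases hPc : pvInter ([] : List Char) (g2 :: r2) with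
      | nil => exact absurd hPc hP
      | cons p ps =>
        have ih2 := ih (fun g' hg' => h g' (by simp [hg']))
        rw [hPc] at ih2
        simp only [List.map_cons] at ih2 ⊢
        rw [PySem.Chars.join_cons_cons, ih2,
          PySem.Chars.join_cons_cons (sep := ['\n','\n'])
            (p := PySem.Chars.join ['\n'] g)]
        simp

lemma pv_canonC_facts (d : List Char) (hd : CanonC d) (hne : d ≠ []) :
    PySem.Chars.lstrip d = d ∧ PySem.Chars.rstrip d = d := by
  rcases hd with h | ⟨_, h⟩
  · exact absurd h hne
  · have hls : PySem.Chars.lstrip d <:+ d := List.dropWhile_suffix _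
    have hrs : PySem.Chars.rstrip (PySem.Chars.lstrip d) <+: PySem.Chars.lstrip d := by
      unfold PySem.Chars.rstrip
      have h0 : List.dropWhile PySem.Chars.isspace (PySem.Chars.lstrip d).reverse
          <:+ (PySem.Chars.lstrip d).reverse := List.dropWhile_suffix _
      have h1 := h0.reverse
      simpa using h1
    have hlen1 : (PySem.Chars.strip d).length ≤ (PySem.Chars.lstrip d).length := by
      have : PySem.Chars.strip d = PySem.Chars.rstrip (PySem.Chars.lstrip d) := rfl
      rw [this]; exact hrs.length_le
    have hlen2 : (PySem.Chars.lstrip d).length ≤ d.length := hls.length_le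
    have hlen3 : (PySem.Chars.strip d).length = d.length := by rw [h]
    have hls_eq : PySem.Chars.lstrip d = d := hls.eq_of_length (by omega)
    constructor
    · exact hls_eq
    · have : PySem.Chars.strip d = PySem.Chars.rstrip (PySem.Chars.lstrip d) := rfl
      rw [this, hls_eq] at h
      exact h

lemma pv_canon_NB (d : List Char) (hd : CanonC d) :
    d = [] ∨ ∃ c t, d = c :: t ∧ PySem.Chars.isspace c = false := by
  rcases hd with h | ⟨hne, hstrip⟩
  · exact Or.inl h
  · right
    have hls := (pv_canonC_facts d (Or.inr ⟨hne, hstrip⟩) hne).1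
    cases d with
    | nil => exact absurd rfl hne
    | cons c t =>
      refine ⟨c, t, rfl, ?_⟩
      by_cases hc : PySem.Chars.isspace c
      · exfalso
        unfold PySem.Chars.lstrip at hls
        rw [List.dropWhile_cons, if_pos (by simpa using hc)] at hls
        have := congrArg List.length hls
        have h2 := List.length_dropWhile_le PySem.Chars.isspace t
        simp at this
        omega
      · simpa using hc

lemma pv_canon_NB_rev (d : List Char) (hd : CanonC d) :
    d = [] ∨ ∃ c t, d.reverse = c :: t ∧ PySem.Chars.isspace c = false := by
  rcases hd with h | ⟨hne, hstrip⟩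
  · exact Or.inl h
  · right
    have hrs := (pv_canonC_facts d (Or.inr ⟨hne, hstrip⟩) hne).2
    have hrev : List.dropWhile PySem.Chars.isspace d.reverse = d.reverse := by
      have := congrArg List.reverse hrs
      unfold PySem.Chars.rstrip at this
      simpa using this
    cases hdr : d.reverse with
    | nil => exact absurd (by simpa using hdr) hne
    | cons c t =>
      refine ⟨c, t, rfl, ?_⟩
      by_cases hc : PySem.Chars.isspace c
      · exfalso
        rw [hdr, List.dropWhile_cons, if_pos (by simpa using hc)] at hrev
        have := congrArg List.length hrev
        have h2 := List.length_dropWhile_le PySem.Chars.isspace t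
        simp at this
        omega
      · simpa using hc

-- the char-level core: strip of the '\n'-join of the collapsed lines is the
-- "\n\n"-join of the paragraphs
lemma pv_main_chars (ds : List (List Char)) (h : ∀ d ∈ ds, CanonC d) :
    PySem.Chars.strip (PySem.Chars.join ['\n'] (pvCollapse (·.isEmpty) ds))
      = PySem.Chars.join ['\n', '\n'] ((pvG (·.isEmpty) ds).map (PySem.Chars.join ['\n'])) := by
  have hmem : ∀ d ∈ pvCollapse (·.isEmpty) ds, CanonC d := by
    intro d hd
    exact h d (pv_mem_pvCollapse (·.isEmpty) ds.length ds le_rfl d hd)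
  have h1 : PySem.Chars.strip (PySem.Chars.join ['\n'] (pvCollapse (·.isEmpty) ds))
      = PySem.Chars.rstrip (PySem.Chars.lstrip
          (PySem.Chars.join ['\n'] (pvCollapse (·.isEmpty) ds))) := rfl
  rw [h1, pv_lstrip_join _ (fun d hd => pv_canon_NB d (hmem d hd))]
  rw [pv_rstrip_join _ (fun d hd =>
    pv_canon_NB_rev d (hmem d ((List.dropWhile_sublist _).subset hd)))]
  rw [pv_K (·.isEmpty) ([] : List Char) (fun x hx => by simpa [List.isEmpty_iff] using hx)
    ds.length ds le_rfl]
  exact pv_join_pvInter _ (pv_pvG_ne_nil (·.isEmpty) ds.length ds le_rfl)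

lemma pv_blank (x : String) : x.toList.isEmpty = (x == "") := by
  by_cases h : x = ""
  · subst h; rfl
  · have h2 : x.toList ≠ [] := fun hn => h (String.toList_inj.mp (by rw [hn]; rfl))
    have h3 : (x == "") = false := beq_eq_false_iff_ne.mpr h
    have h4 : x.toList.isEmpty = false := by
      cases hl : x.toList with
      | nil => exact absurd hl h2
      | cons a t => rfl
    rw [h3, h4]

lemma pv_collapse_map_toList (cs : List String) :
    (pvCollapse (· == "") cs).map String.toList = pvCollapse (·.isEmpty) (cs.map String.toList) := by
  induction hn : cs.length using Nat.strong_induction_on generalizing cs with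
  | _ n ih =>
    cases cs with
    | nil => simp [pvCollapse]
    | cons x r =>
      by_cases hx : x == ""
      · rw [pvCollapse, if_pos hx, List.map_cons, List.map_cons, pvCollapse,
          if_pos (by rw [pv_blank]; exact hx)]
        rw [List.dropWhile_map]
        have hfc : ((fun d : List Char => d.isEmpty) ∘ String.toList) = (· == "") := by
          funext y; simp [Function.comp, pv_blank]
        rw [hfc]
        subst hn
        rw [ih (r.dropWhile (· == "")).length
          (Nat.lt_succ_of_le (List.length_dropWhile_le _ _)) _ rfl]
      · rw [pvCollapse, if_neg hx, List.map_cons, List.map_cons, pvCollapse,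
          if_neg (by rw [pv_blank]; exact hx)]
        subst hn
        rw [ih r.length (by simp) r rfl]

lemma pv_pvG_map_toList (cs : List String) :
    (pvG (· == "") cs).map (List.map String.toList)
      = pvG (·.isEmpty) (cs.map String.toList) := by
  induction hn : cs.length using Nat.strong_induction_on generalizing cs with
  | _ n ih =>
    cases cs with
    | nil => simp [pvG]
    | cons x r =>
      by_cases hx : x == ""
      · have hx2 : (String.toList x).isEmpty = true := by rw [pv_blank]; exact hx
        conv_rhs => rw [List.map_cons, pvG]
        rw [if_pos hx2, pvG, if_pos hx]
        subst hn
        exact ih r.length (by simp) r rfl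
      · have hx2 : (String.toList x).isEmpty = false := by
          rw [pv_blank]; simpa using hx
        have hfc : ((fun y : List Char => !y.isEmpty) ∘ String.toList)
            = (fun y : String => !(y == "")) := by
          funext y; simp [Function.comp, pv_blank]
        conv_rhs => rw [List.map_cons, pvG]
        rw [if_neg (by simp [hx2]), pvG, if_neg hx]
        rw [List.takeWhile_map, List.dropWhile_map, hfc]
        subst hn
        rw [← ih (r.dropWhile fun y => !(y == "")).length
          (Nat.lt_succ_of_le (List.length_dropWhile_le _ _)) _ rfl]
        simp

-- the String-level core equation
lemma pv_main_str (cs : List String)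
    (h : ∀ x ∈ cs, x = "" ∨ (x ≠ "" ∧ PySem.Str.strip x = x)) :
    PySem.Str.strip (PySem.Str.join "\n" (pvCollapse (· == "") cs))
      = PySem.Str.join "\n\n" ((pvG (· == "") cs).map (fun p => PySem.Str.join "\n" p)) := by
  apply String.toList_inj.mp
  rw [PySem.Str.toList_strip, PySem.Str.toList_join, PySem.Str.toList_join]
  have hnl : ("\n" : String).toList = ['\n'] := rfl
  have hnl2 : ("\n\n" : String).toList = ['\n', '\n'] := rfl
  rw [hnl, hnl2, pv_collapse_map_toList]
  have hmap : ((pvG (· == "") cs).map (fun p => PySem.Str.join "\n" p)).map String.toList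
      = ((pvG (· == "") cs).map (List.map String.toList)).map (PySem.Chars.join ['\n']) := by
    rw [List.map_map, List.map_map]
    apply List.map_congr_left
    intro p _
    simp [Function.comp, PySem.Str.toList_join, hnl]
  rw [hmap, pv_pvG_map_toList]
  apply pv_main_chars
  intro d hd
  simp only [List.mem_map] at hd
  rcases hd with ⟨x, hx, rfl⟩
  rcases h x hx with h0 | ⟨hne, hstrip⟩
  · left; simp [h0]
  · right
    constructor
    · exact fun hn => hne (String.toList_inj.mp (by rw [hn]; rfl))
    · rw [← PySem.Str.toList_strip, hstrip]

-- strip is idempotent (Chars and Str)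
lemma pv_dropWhile_idem {α : Type} (p : α → Bool) (l : List α) :
    List.dropWhile p (List.dropWhile p l) = List.dropWhile p l := by
  induction l with
  | nil => simp
  | cons c t ih =>
    by_cases h : p c
    · simpa [List.dropWhile_cons, h] using ih
    · simp [h]

lemma pv_rstrip_cons (c : Char) (t : List Char) :
    PySem.Chars.rstrip (c :: t) =
      if PySem.Chars.isspace c = true ∧ PySem.Chars.rstrip t = [] then []
      else c :: PySem.Chars.rstrip t := by
  by_cases he : List.dropWhile PySem.Chars.isspace t.reverse = []
  · by_cases hc : PySem.Chars.isspace c = true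
    · simp [PySem.Chars.rstrip, List.dropWhile_append, he, hc]
    · simp [PySem.Chars.rstrip, List.dropWhile_append, he, hc]
  · have hie : (List.dropWhile PySem.Chars.isspace t.reverse).isEmpty = false := by
      simpa [List.isEmpty_iff] using he
    simp [PySem.Chars.rstrip, List.dropWhile_append, hie, he]

lemma pv_rstrip_nil_lstrip {t : List Char} (h : PySem.Chars.rstrip t = []) :
    PySem.Chars.lstrip t = [] := by
  unfold PySem.Chars.rstrip at h
  unfold PySem.Chars.lstrip
  rw [List.dropWhile_eq_nil_iff]
  have := (List.dropWhile_eq_nil_iff).1 (by simpa [List.reverse_eq_nil_iff] using h)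
  intro x hx; exact this x (by simpa using hx)

lemma pv_lstrip_rstrip (s : List Char) :
    PySem.Chars.lstrip (PySem.Chars.rstrip s) = PySem.Chars.rstrip (PySem.Chars.lstrip s) := by
  induction s with
  | nil => rfl
  | cons c t ih =>
    rw [pv_rstrip_cons]
    by_cases hc : PySem.Chars.isspace c = true
    · have h2 : PySem.Chars.lstrip (c :: t) = PySem.Chars.lstrip t := by
        simp [PySem.Chars.lstrip, hc]
      by_cases hr : PySem.Chars.rstrip t = []
      · rw [if_pos ⟨hc, hr⟩, h2, pv_rstrip_nil_lstrip hr]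
        rfl
      · have h1 : PySem.Chars.lstrip (c :: PySem.Chars.rstrip t)
            = PySem.Chars.lstrip (PySem.Chars.rstrip t) := by
          simp [PySem.Chars.lstrip, hc]
        rw [if_neg (fun hand => hr hand.2), h1, h2, ih]
    · have h1 : PySem.Chars.lstrip (c :: PySem.Chars.rstrip t)
          = c :: PySem.Chars.rstrip t := by
        simp [PySem.Chars.lstrip, hc]
      have h2 : PySem.Chars.lstrip (c :: t) = c :: t := by
        simp [PySem.Chars.lstrip, hc]
      rw [if_neg (fun hand => hc hand.1), h1, h2, pv_rstrip_cons,
        if_neg (fun hand => hc hand.1)]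

lemma pv_rstrip_idem (s : List Char) :
    PySem.Chars.rstrip (PySem.Chars.rstrip s) = PySem.Chars.rstrip s := by
  unfold PySem.Chars.rstrip
  rw [List.reverse_reverse, pv_dropWhile_idem]

lemma pv_strip_rstrip_chars (s : List Char) :
    PySem.Chars.strip (PySem.Chars.rstrip s) = PySem.Chars.strip s := by
  unfold PySem.Chars.strip
  rw [pv_lstrip_rstrip, pv_rstrip_idem]

lemma pv_strip_rstrip (s : String) :
    PySem.Str.strip (PySem.Str.rstrip s) = PySem.Str.strip s := by
  apply String.toList_inj.mp
  rw [PySem.Str.toList_strip, PySem.Str.toList_strip, PySem.Str.toList_rstrip,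
    pv_strip_rstrip_chars]

lemma pv_strip_chars_idem (x : List Char) :
    PySem.Chars.strip (PySem.Chars.strip x) = PySem.Chars.strip x := by
  show PySem.Chars.rstrip (PySem.Chars.lstrip (PySem.Chars.rstrip (PySem.Chars.lstrip x)))
      = PySem.Chars.rstrip (PySem.Chars.lstrip x)
  rw [pv_lstrip_rstrip]
  rw [show PySem.Chars.lstrip (PySem.Chars.lstrip x) = PySem.Chars.lstrip x from
    pv_dropWhile_idem _ _]
  rw [pv_rstrip_idem]

lemma pv_strip_idem (s : String) : PySem.Str.strip (PySem.Str.strip s) = PySem.Str.strip s := by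
  apply String.toList_inj.mp
  simp only [PySem.Str.toList_strip]
  exact pv_strip_chars_idem s.toList

lemma pv_canon_blank {l : String} (h : PySem.Str.strip l = "") : pvC l = "" := by
  unfold pvC
  rw [h]
  rfl

lemma pv_canon_nonblank {l : String} (h : ¬ PySem.Str.strip l = "") : pvC l ≠ "" := by
  unfold pvC pvCanonLine
  dsimp only
  split_ifs <;> simp [h]

lemma pv_canon_canon (l : String) :
    pvC l = "" ∨ (pvC l ≠ "" ∧ PySem.Str.strip (pvC l) = pvC l) := by
  by_cases h : PySem.Str.strip l = ""
  · exact Or.inl (pv_canon_blank h)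
  · right
    refine ⟨pv_canon_nonblank h, ?_⟩
    unfold pvC pvCanonLine
    dsimp only
    split_ifs <;> first
      | decide
      | exact pv_strip_idem l

lemma pv_canon_rstrip (l : String) : pvC (PySem.Str.rstrip l) = pvC l := by
  unfold pvC
  rw [pv_strip_rstrip]

-- A's loop, started in state (acc, pb), produces acc ++ the collapse of the canonical lines
lemma pv_fold_A (ls : List String) : ∀ (acc : List String) (pb : Bool),
    (ls.foldl pvStepA (acc, pb)).1 =
      acc ++ pvCollapse (· == "")
        (if pb then (ls.map pvC).dropWhile (· == "") else ls.map pvC) := by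
  induction ls with
  | nil =>
    intro acc pb
    cases pb <;> simp [pvCollapse]
  | cons l ls ih =>
    intro acc pb
    by_cases h : PySem.Str.strip l = ""
    · have hc : pvC l = "" := pv_canon_blank h
      cases pb
      · have hstep : pvStepA (acc, false) l = (acc ++ [""], true) := by
          unfold pvStepA; simp [h]
        rw [List.foldl_cons, hstep, ih (acc ++ [""]) true]
        rw [if_pos rfl, if_neg (show ¬(false = true) by simp)]
        rw [List.map_cons, hc, pvCollapse, if_pos (by simp)]
        simp
      · have hstep : pvStepA (acc, true) l = (acc, true) := by
          unfold pvStepA; simp [h]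
        rw [List.foldl_cons, hstep, ih acc true]
        rw [if_pos rfl, List.map_cons, hc, List.dropWhile_cons]
        simp
    · have hc : pvC l ≠ "" := pv_canon_nonblank h
      have hstep : ∀ pb, pvStepA (acc, pb) l = (acc ++ [pvC l], false) := by
        intro pb
        unfold pvStepA pvC pvCanonLine
        simp [h]
      cases pb
      · rw [List.foldl_cons, hstep, ih (acc ++ [pvC l]) false]
        rw [if_neg (show ¬(false = true) by simp), if_neg (show ¬(false = true) by simp)]
        rw [List.map_cons, pvCollapse, if_neg (by simpa using hc)]
        simp
      · rw [List.foldl_cons, hstep, ih (acc ++ [pvC l]) false]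
        rw [if_neg (show ¬(false = true) by simp), if_pos rfl]
        rw [List.map_cons, List.dropWhile_cons,
          if_neg (by simpa using hc), pvCollapse, if_neg (by simpa using hc)]
        simp

-- B's loop, started in state (ps, cur), produces ps ++ the paragraph grouping
lemma pv_fold_B (ls : List String) : ∀ (ps : List (List String)) (cur : List String),
    (if (ls.foldl pvStepB (ps, cur)).2 != [] then
       (ls.foldl pvStepB (ps, cur)).1 ++ [(ls.foldl pvStepB (ps, cur)).2]
     else (ls.foldl pvStepB (ps, cur)).1) =
      ps ++ (if cur = [] then pvG (· == "") (ls.map pvC)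
        else (cur ++ (ls.map pvC).takeWhile (fun y => !(y == "")))
          :: pvG (· == "") ((ls.map pvC).dropWhile (fun y => !(y == "")))) := by
  induction ls with
  | nil =>
    intro ps cur
    by_cases h : cur = []
    · simp [h, pvG]
    · simp [h, pvG]
  | cons l ls ih =>
    intro ps cur
    by_cases h : PySem.Str.strip l = ""
    · have hc : pvC l = "" := pv_canon_blank h
      by_cases hcur : cur = []
      · have hstep : pvStepB (ps, cur) l = (ps, cur) := by
          unfold pvStepB; simp [h, hcur]
        rw [List.foldl_cons, hstep, ih ps cur]
        rw [List.map_cons, hc, if_pos hcur, if_pos hcur, pvG, if_pos (by simp)]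
      · have hstep : pvStepB (ps, cur) l = (ps ++ [cur], []) := by
          unfold pvStepB; simp [h, hcur]
        rw [List.foldl_cons, hstep, ih (ps ++ [cur]) []]
        rw [List.map_cons, hc, if_neg hcur]
        rw [List.takeWhile_cons, List.dropWhile_cons]
        simp [pvG]
    · have hc : pvC l ≠ "" := pv_canon_nonblank h
      have hstep : pvStepB (ps, cur) l = (ps, cur ++ [pvC l]) := by
        unfold pvStepB pvC pvCanonLine
        simp [h]
      rw [List.foldl_cons, hstep, ih ps (cur ++ [pvC l])]
      rw [if_neg (by simp)]
      by_cases hcur : cur = []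
      · subst hcur
        rw [if_pos rfl, List.map_cons, pvG, if_neg (by simpa using hc)]
        simp
      · rw [if_neg hcur, List.map_cons, List.takeWhile_cons, List.dropWhile_cons]
        simp [hc]

-- ===== VERDICT (by name: the statement is the Claim_ definition above) =====
set_option maxHeartbeats 4000000 in
theorem format_tailored_bullets_spec : Claim_equal_format_tailored_bullets := by
  intro text _
  unfold Spec_format_tailored_bullets format_tailored_bullets format_tailored_bullets_alt
  by_cases h : (PySem.Str.strip text == "") = true
  · have h0 : PySem.Str.strip text = "" := by simpa using h
    rw [if_pos h, h0]
    rw [show PySem.Str.splitlines "" = [] from rfl]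
    rfl
  · rw [if_neg h]
    have hmapC : ((PySem.Str.splitlines (PySem.Str.strip text)).map PySem.Str.rstrip).map pvC
        = (PySem.Str.splitlines (PySem.Str.strip text)).map pvC := by
      rw [List.map_map]
      simp only [Function.comp_def, pv_canon_rstrip]
    show PySem.Str.strip (PySem.Str.join "\n"
        ((((PySem.Str.splitlines (PySem.Str.strip text)).map PySem.Str.rstrip).foldl
          pvStepA ([], false)).1))
      = PySem.Str.join "\n\n"
        ((if ((PySem.Str.splitlines (PySem.Str.strip text)).foldl pvStepB ([], [])).2 != []
          then ((PySem.Str.splitlines (PySem.Str.strip text)).foldl pvStepB ([], [])).1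
            ++ [((PySem.Str.splitlines (PySem.Str.strip text)).foldl pvStepB ([], [])).2]
          else ((PySem.Str.splitlines (PySem.Str.strip text)).foldl pvStepB ([], [])).1).map
          (fun p => PySem.Str.join "\n" p))
    rw [pv_fold_A ((PySem.Str.splitlines (PySem.Str.strip text)).map PySem.Str.rstrip) [] false,
      if_neg (show ¬(false = true) by simp), hmapC, List.nil_append]
    rw [pv_fold_B (PySem.Str.splitlines (PySem.Str.strip text)) [] [],
      if_pos rfl, List.nil_append]
    exact pv_main_str _ (fun x hx => by
      rcases List.mem_map.mp hx with ⟨l, _, rfl⟩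
      exact pv_canon_canon l)
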